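-- pv_equiv track=rewrite | github.com/GEOS-ESM/GEOS_Util | plots_v2/stats_v2/stats.py | _normalize_variable_name
-- ===== SOURCE A (Python) =====
-- def _normalize_variable_name(var_nms: str) -> str:
--     '''Normalize variable name according to naming convention'''
--     var_upper = var_nms.upper()
--     # Find first digit
--     first_digit_pos = -1
--     for i, char in enumerate(var_upper):
--         if char.isdigit():
--             first_digit_pos = i
--             break
--     if first_digit_pos == -1:
--         # All caps when no digits
--         return var_upper
--     else:
--         # With digits, caps before and lowercase after
--         return (var_upper[:first_digit_pos]
--                 + var_upper[first_digit_pos:].lower())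
-- ===== SOURCE B (Python) =====
-- def _normalize_variable_name(var_nms: str) -> str:
--     '''Normalize variable name according to naming convention'''
--     s = var_nms.upper()
--     seen_digit = False
--     out = []
--     for ch in s:
--         if not seen_digit and ch.isdigit():
--             seen_digit = True
--         out.append(ch.lower() if seen_digit else ch)
--     return ''.join(out)
-- ===== Notes on version B (the rewrite author's own statement) =====
-- stated objective: simpler
-- what changed: Replaces the find-first-digit-then-slice-and-lower two-phase approach with a single accumulating pass over the uppercased string carrying a seen_digit flag.
import Mathlib
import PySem

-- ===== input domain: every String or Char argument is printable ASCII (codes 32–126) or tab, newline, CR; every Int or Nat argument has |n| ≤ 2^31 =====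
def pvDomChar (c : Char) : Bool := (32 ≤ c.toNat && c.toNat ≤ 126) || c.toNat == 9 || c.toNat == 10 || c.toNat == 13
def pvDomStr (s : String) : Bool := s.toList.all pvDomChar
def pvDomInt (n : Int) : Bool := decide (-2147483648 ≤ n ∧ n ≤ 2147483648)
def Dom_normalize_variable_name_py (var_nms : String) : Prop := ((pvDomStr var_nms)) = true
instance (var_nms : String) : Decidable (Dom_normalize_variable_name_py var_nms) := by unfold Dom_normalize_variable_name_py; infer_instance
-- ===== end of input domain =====

-- B replaces A's find-first-digit-then-slice-and-lower two-phase scan with a single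
-- accumulating pass carrying a seen_digit flag (objective: simpler).

-- ===== PORT A =====
-- A's 'for i, char in enumerate(var_upper): if char.isdigit(): first_digit_pos = i; break'
def pvFindDigitA : List Char → Nat → Int
  | [], _ => -1
  | c :: cs, i => if PySem.Chars.isdigit c then (i : Int) else pvFindDigitA cs (i + 1)

def normalize_variable_name_py (var_nms : String) : String :=
  let var_upper := PySem.Str.upper var_nms
  let first_digit_pos := pvFindDigitA var_upper.toList 0
  if first_digit_pos = -1 then
    var_upper
  else
    String.ofList
      (PySem.List.slice var_upper.toList none (some first_digit_pos)
        ++ PySem.Chars.lower (PySem.List.slice var_upper.toList (some first_digit_pos) none))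

-- ===== PORT B =====
-- B's loop: state (seen_digit, out); 'out.append(ch.lower() if seen else ch)'
def pvGoB : Bool → List Char → List Char
  | _, [] => []
  | seen, c :: cs =>
    let seen' := seen || PySem.Chars.isdigit c
    (if seen' then PySem.Chars.lowerChar c else c) :: pvGoB seen' cs

def normalize_variable_name_py_alt (var_nms : String) : String :=
  let s := PySem.Str.upper var_nms
  String.ofList (pvGoB false s.toList)

-- ===== PRECONDITION & SPEC =====
def Spec_normalize_variable_name_py (var_nms : String) (out : String) : Prop := out = normalize_variable_name_py_alt var_nms
instance (var_nms : String) (out : String) : Decidable (Spec_normalize_variable_name_py var_nms out) := by unfold Spec_normalize_variable_name_py; infer_instance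

-- ===== CLAIM (what is proved, stated in full; the proofs are below) =====
def Claim_equal_normalize_variable_name_py : Prop := ∀ (var_nms : String), Dom_normalize_variable_name_py var_nms → Spec_normalize_variable_name_py var_nms (normalize_variable_name_py var_nms)

-- ===== LEMMAS AND PROOFS =====

-- once the flag is set, B lowers every remaining char
theorem pvGoB_true (l : List Char) : pvGoB true l = PySem.Chars.lower l := by
  induction l with
  | nil => simp [pvGoB, PySem.Chars.lower]
  | cons c cs ih => simp [pvGoB, PySem.Chars.lower, ih]

theorem pvFindDigitA_eq (l : List Char) (i : Nat) :
    pvFindDigitA l i = match l.findIdx? (fun c => PySem.Chars.isdigit c) with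
      | none => -1
      | some j => (i : Int) + j := by
  induction l generalizing i with
  | nil => simp [pvFindDigitA]
  | cons c cs ih =>
    by_cases h : PySem.Chars.isdigit c
    · simp [pvFindDigitA, h, List.findIdx?_cons]
    · simp only [pvFindDigitA, h, if_false, ih, List.findIdx?_cons, Bool.false_eq_true]
      cases cs.findIdx? (fun c => PySem.Chars.isdigit c) with
      | none => simp
      | some j => simp [Option.map_some]; ring

theorem pv_core (l : List Char) :
    (match l.findIdx? (fun c => PySem.Chars.isdigit c) with
      | none => l
      | some j => l.take j ++ PySem.Chars.lower (l.drop j)) = pvGoB false l := by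
  induction l with
  | nil => simp [pvGoB]
  | cons c cs ih =>
    by_cases h : PySem.Chars.isdigit c
    · simp [List.findIdx?_cons, h, pvGoB, pvGoB_true, PySem.Chars.lower]
    · simp only [List.findIdx?_cons, h, Bool.false_eq_true, if_false, pvGoB, Bool.false_or]
      cases hfi : cs.findIdx? (fun c => PySem.Chars.isdigit c) with
      | none => simpa [hfi] using ih
      | some j =>
        simp only [Option.map_some, List.take_succ_cons, List.drop_succ_cons, List.cons_append]
        simpa [hfi] using ih

-- ===== VERDICT (by name: the statement is the Claim_ definition above) =====
theorem normalize_variable_name_py_spec : Claim_equal_normalize_variable_name_py := by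
  intro var_nms _
  unfold Spec_normalize_variable_name_py
  unfold normalize_variable_name_py normalize_variable_name_py_alt
  simp only
  set l := (PySem.Str.upper var_nms).toList with hl
  rw [pvFindDigitA_eq]
  cases hfi : l.findIdx? (fun c => PySem.Chars.isdigit c) with
  | none =>
    simp only [if_pos]
    rw [← pv_core l, hfi, hl, PySem.Str.toList_upper]
    rw [← PySem.Str.toList_upper, String.ofList_toList]
  | some j =>
    have hne : (0 : Int) + (j : Int) ≠ -1 := by omega
    simp only [hne, if_false]
    rw [← pv_core l, hfi]
    simp [PySem.List.slice_to_natCast, PySem.List.slice_from_natCast]
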